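-- pv_equiv track=rewrite | github.com/CodeWithAsheville/pdf-case-compare | pisgah_pdf.py | get_lexis_cases_not_in_ciprs
-- ===== SOURCE A (Python) =====
-- def get_lexis_cases_not_in_ciprs(lexis_case_number_list, ciprs_case_number_list):
--     # compare the case numbers based on last 6 digits
--     lexis_cases_not_found = []
--     lexis_cases_six_digits_not_found = []
--     for lexis_case_number in lexis_case_number_list:
--         lexis_case_six_digit = lexis_case_number[-6:]
--         found_match = False
--         for ciprs_case_number in ciprs_case_number_list:
--             if lexis_case_six_digit == ciprs_case_number[-6:]:
--                 found_match = True
--         if found_match == False: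
--             # only report if new case number (based on last-6-digits)
--             if lexis_case_six_digit not in lexis_cases_six_digits_not_found:
--                 lexis_cases_six_digits_not_found.append(lexis_case_six_digit)
--                 # only report if full case number not already in the list
--                 if lexis_case_number not in lexis_cases_not_found:
--                     lexis_cases_not_found.append(lexis_case_number)
--     return lexis_cases_not_found
-- ===== SOURCE B (Python) =====
-- def get_lexis_cases_not_in_ciprs(lexis_case_number_list, ciprs_case_number_list):
--     # compare the case numbers based on last 6 digits; consume the lexis list
--     # back-to-front, deciding each case by looking back at the cases before it,
--     # then reverse the collected report into first-appearance order
--     ciprs_suffixes = {c[-6:] for c in ciprs_case_number_list}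
--     report = []
--     rest = list(lexis_case_number_list)
--     while rest:
--         case = rest.pop()
--         suffix = case[-6:]
--         if suffix not in ciprs_suffixes and all(r[-6:] != suffix for r in rest):
--             report.append(case)
--     report.reverse()
--     return report
-- ===== Notes on version B (the rewrite author's own statement) =====
-- stated objective: alternative
-- what changed: Instead of a forward scan that rescans ciprs per case and maintains two seen-so-far dedup accumulators, B precomputes the ciprs suffix set once, consumes the lexis list back-to-front with pop, decides each case by a direct look-back over the cases preceding it (no dedup state at all), and reverses the collected report at the end.
import Mathlib
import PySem

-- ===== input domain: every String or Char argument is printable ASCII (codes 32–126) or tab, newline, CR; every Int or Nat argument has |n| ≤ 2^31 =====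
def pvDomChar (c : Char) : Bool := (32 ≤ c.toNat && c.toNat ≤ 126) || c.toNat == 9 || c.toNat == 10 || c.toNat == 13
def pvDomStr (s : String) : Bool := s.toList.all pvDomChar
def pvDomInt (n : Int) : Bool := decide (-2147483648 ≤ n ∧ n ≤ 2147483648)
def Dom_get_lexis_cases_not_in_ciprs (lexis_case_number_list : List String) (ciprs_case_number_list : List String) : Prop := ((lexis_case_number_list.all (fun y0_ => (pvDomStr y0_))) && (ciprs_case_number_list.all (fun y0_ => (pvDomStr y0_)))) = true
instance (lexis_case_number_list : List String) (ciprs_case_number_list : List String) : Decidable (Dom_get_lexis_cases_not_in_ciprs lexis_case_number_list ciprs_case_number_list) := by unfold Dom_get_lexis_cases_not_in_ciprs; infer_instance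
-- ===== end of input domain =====

-- B replaces A's forward scan (inner ciprs rescan + two seen-so-far dedup lists) by a
-- back-to-front pop loop that decides each case by a direct look-back over the preceding
-- cases, then reverses the report (alternative decomposition; return value only).


-- shared helper: Python's s[-6:]
def pvLast6 (s : String) : String := PySem.Str.slice s (some (-6)) none

-- ===== PORT A =====
def get_lexis_cases_not_in_ciprs (lexis_case_number_list : List String) (ciprs_case_number_list : List String) : List String :=
  (lexis_case_number_list.foldl
    (fun (st : List String × List String) lexis_case_number =>
      let lexis_case_six_digit := pvLast6 lexis_case_number
      let found_match := ciprs_case_number_list.foldl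
        (fun found_match ciprs_case_number =>
          if lexis_case_six_digit == pvLast6 ciprs_case_number then true else found_match) false
      if found_match = false then
        if !(st.2.contains lexis_case_six_digit) then
          if !(st.1.contains lexis_case_number) then
            (st.1 ++ [lexis_case_number], st.2 ++ [lexis_case_six_digit])
          else (st.1, st.2 ++ [lexis_case_six_digit])
        else st
      else st)
    ([], [])).1

-- ===== PORT B =====
-- B's while-loop: pop the last element of rest, keep it if its suffix is outside the
-- ciprs suffix set and no remaining (earlier) case shares it
def pvBGo (S : PySem.Set String) (rest : List String) (report : List String) : List String :=
  if h : rest = [] then report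
  else
    let case := rest.getLast h
    let rest' := rest.dropLast
    let suffix := pvLast6 case
    if !(PySem.Set.contains S suffix) && rest'.all (fun r => !(pvLast6 r == suffix)) then
      pvBGo S rest' (report ++ [case])
    else
      pvBGo S rest' report
termination_by rest.length
decreasing_by
  all_goals
    simpa [List.length_dropLast] using Nat.sub_lt (List.length_pos_iff.mpr h) Nat.one_pos

def get_lexis_cases_not_in_ciprs_alt (lexis_case_number_list : List String) (ciprs_case_number_list : List String) : List String :=
  let ciprs_suffixes : PySem.Set String := PySem.Set.ofList (ciprs_case_number_list.map pvLast6)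
  (pvBGo ciprs_suffixes lexis_case_number_list []).reverse

-- ===== PRECONDITION & SPEC =====
def Spec_get_lexis_cases_not_in_ciprs (lexis_case_number_list : List String) (ciprs_case_number_list : List String) (out : List String) : Prop := out = get_lexis_cases_not_in_ciprs_alt lexis_case_number_list ciprs_case_number_list
instance (lexis_case_number_list : List String) (ciprs_case_number_list : List String) (out : List String) : Decidable (Spec_get_lexis_cases_not_in_ciprs lexis_case_number_list ciprs_case_number_list out) := by unfold Spec_get_lexis_cases_not_in_ciprs; infer_instance

-- ===== CLAIM (what is proved, stated in full; the proofs are below) =====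
def Claim_equal_get_lexis_cases_not_in_ciprs : Prop := ∀ (lexis_case_number_list : List String) (ciprs_case_number_list : List String), Dom_get_lexis_cases_not_in_ciprs lexis_case_number_list ciprs_case_number_list → Spec_get_lexis_cases_not_in_ciprs lexis_case_number_list ciprs_case_number_list (get_lexis_cases_not_in_ciprs lexis_case_number_list ciprs_case_number_list)

-- ===== LEMMAS AND PROOFS =====

-- A's loop body, named for the proofs (definitionally A's lambda)
def pvAStep (ciprs : List String) (st : List String × List String) (n : String) :
    List String × List String :=
  if (ciprs.foldl (fun found_match c => if pvLast6 n == pvLast6 c then true else found_match) false) = false then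
    if !(st.2.contains (pvLast6 n)) then
      if !(st.1.contains n) then
        (st.1 ++ [n], st.2 ++ [pvLast6 n])
      else (st.1, st.2 ++ [pvLast6 n])
    else st
  else st

-- common specification: the kept cases of the remaining list, given the list `pre` of
-- cases that precede them
def pvKept (S : PySem.Set String) : List String → List String → List String
  | _, [] => []
  | pre, x :: xs =>
    if !(PySem.Set.contains S (pvLast6 x)) && pre.all (fun p => !(pvLast6 p == pvLast6 x)) then
      x :: pvKept S (pre ++ [x]) xs
    else
      pvKept S (pre ++ [x]) xs

-- A's inner ciprs scan is membership of the suffix in B's ciprs-suffix set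
lemma found_match_eq (ciprs : List String) (sfx : String) :
    ciprs.foldl (fun found_match c => if sfx == pvLast6 c then true else found_match) false
      = PySem.Set.contains (PySem.Set.ofList (ciprs.map pvLast6)) sfx := by
  rw [PySem.List.foldl_if_true_eq]
  apply Bool.eq_iff_iff.mpr
  rw [PySem.Set.contains_iff, PySem.Set.mem_ofList]
  simp only [Bool.false_or, List.any_eq_true, List.mem_map, beq_iff_eq]
  constructor
  · rintro ⟨c, hc, he⟩; exact ⟨c, hc, he.symm⟩
  · rintro ⟨c, hc, he⟩; exact ⟨c, hc, he.symm⟩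

-- pvKept over a snoc: the last element is kept iff its suffix is new w.r.t. pre ++ r
lemma kept_snoc (S : PySem.Set String) (r : List String) (c : String) :
    ∀ pre, pvKept S pre (r ++ [c])
      = pvKept S pre r ++
        (if !(PySem.Set.contains S (pvLast6 c)) && (pre ++ r).all (fun p => !(pvLast6 p == pvLast6 c))
         then [c] else []) := by
  induction r with
  | nil =>
      intro pre
      simp only [List.nil_append, List.append_nil, pvKept]
  | cons x xs ih =>
      intro pre
      simp only [List.cons_append, pvKept]
      rw [ih (pre ++ [x])]
      simp only [List.append_assoc, List.singleton_append]
      split_ifs <;> simp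

-- B's pop loop computes pvKept (reversed) appended to the report
lemma bgo_eq (S : PySem.Set String) (rest : List String) :
    ∀ report, pvBGo S rest report = report ++ (pvKept S [] rest).reverse := by
  induction rest using List.reverseRecOn with
  | nil => intro report; rw [pvBGo]; simp [pvKept]

  | append_singleton r c ih =>
      intro report
      rw [pvBGo, dif_neg (by simp : ¬(r ++ [c] = []))]
      simp only [List.getLast_concat, List.dropLast_concat]
      rw [kept_snoc S r c []]
      simp only [List.nil_append]
      by_cases hc : (!(PySem.Set.contains S (pvLast6 c)) && r.all (fun p => !(pvLast6 p == pvLast6 c))) = true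
      · rw [if_pos hc, if_pos hc, ih]
        simp
      · rw [if_neg hc, if_neg hc, ih]
        simp

-- A's forward loop computes pvKept, given the two accumulator invariants
lemma aloop_eq (ciprs : List String) (rest : List String) :
    ∀ (pre acc1 acc2 : List String),
      (∀ s, acc2.contains s = true ↔
          (PySem.Set.contains (PySem.Set.ofList (ciprs.map pvLast6)) s = false ∧
            ∃ p ∈ pre, pvLast6 p = s)) →
      (∀ y ∈ acc1, acc2.contains (pvLast6 y) = true) →
      (rest.foldl (pvAStep ciprs) (acc1, acc2)).1
        = acc1 ++ pvKept (PySem.Set.ofList (ciprs.map pvLast6)) pre rest := by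
  set S := PySem.Set.ofList (ciprs.map pvLast6) with hS
  induction rest with
  | nil => intro pre acc1 acc2 _ _; simp [pvKept]
  | cons x xs ih =>
      intro pre acc1 acc2 hinv2 hinv1
      rw [List.foldl_cons]
      have hstep : pvAStep ciprs (acc1, acc2) x
          = if (PySem.Set.contains S (pvLast6 x)) = false then
              if !(acc2.contains (pvLast6 x)) then
                if !(acc1.contains x) then (acc1 ++ [x], acc2 ++ [pvLast6 x])
                else (acc1, acc2 ++ [pvLast6 x])
              else (acc1, acc2)
            else (acc1, acc2) := by
        unfold pvAStep
        rw [found_match_eq, ← hS]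
      by_cases hcS : PySem.Set.contains S (pvLast6 x) = true
      · -- suffix found in ciprs: A skips; pvKept skips
        have h1 : pvAStep ciprs (acc1, acc2) x = (acc1, acc2) := by
          rw [hstep, if_neg (by simp only [hcS]; simp)]
        have h2 : pvKept S pre (x :: xs) = pvKept S (pre ++ [x]) xs := by
          simp only [pvKept]; rw [if_neg (by simp only [hcS]; simp)]
        rw [h1, h2]
        refine ih (pre ++ [x]) acc1 acc2 ?_ hinv1
        intro s
        rw [hinv2 s]
        constructor
        · rintro ⟨hns, p, hp, he⟩; exact ⟨hns, p, List.mem_append_left _ hp, he⟩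
        · rintro ⟨hns, p, hp, he⟩
          rcases List.mem_append.mp hp with h | h
          · exact ⟨hns, p, h, he⟩
          · exfalso; simp at h; subst h; rw [he] at hcS; rw [hcS] at hns; exact Bool.true_eq_false.mp hns
      · have hcF : PySem.Set.contains S (pvLast6 x) = false := by
          simpa using hcS
        by_cases hseen : acc2.contains (pvLast6 x) = true
        · -- suffix already reported: A skips; pvKept's look-back finds an equal predecessor
          have h1 : pvAStep ciprs (acc1, acc2) x = (acc1, acc2) := by
            rw [hstep, if_pos hcF, if_neg (by simp only [hseen]; simp)]
          obtain ⟨-, p, hp, he⟩ := (hinv2 _).mp hseen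
          have hall : pre.all (fun p => !(pvLast6 p == pvLast6 x)) = false := by
            rw [List.all_eq_false]
            exact ⟨p, hp, by simp [he]⟩
          have h2 : pvKept S pre (x :: xs) = pvKept S (pre ++ [x]) xs := by
            simp only [pvKept]; rw [if_neg (by simp only [hall]; simp)]
          rw [h1, h2]
          refine ih (pre ++ [x]) acc1 acc2 ?_ hinv1
          intro s
          rw [hinv2 s]
          constructor
          · rintro ⟨hns, q, hq, hqe⟩; exact ⟨hns, q, List.mem_append_left _ hq, hqe⟩
          · rintro ⟨hns, q, hq, hqe⟩
            rcases List.mem_append.mp hq with h | h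
            · exact ⟨hns, q, h, hqe⟩
            · simp at h; subst h; subst hqe; exact ⟨hns, p, hp, he⟩
        · -- genuinely new not-found suffix: A appends to both lists; pvKept keeps x
          have hseenF : acc2.contains (pvLast6 x) = false := by simpa using hseen
          have hfull : acc1.contains x = false := by
            rw [Bool.eq_false_iff]
            intro hmem
            exact hseen (hinv1 x (List.contains_iff_mem.mp hmem))
          have h1 : pvAStep ciprs (acc1, acc2) x = (acc1 ++ [x], acc2 ++ [pvLast6 x]) := by
            rw [hstep, if_pos hcF, if_pos (by simp only [hseenF]; rfl), if_pos (by simp only [hfull]; rfl)]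
          have hall : pre.all (fun p => !(pvLast6 p == pvLast6 x)) = true := by
            rw [List.all_eq_true]
            intro p hp
            simp only [Bool.not_eq_eq_eq_not, Bool.not_true, beq_eq_false_iff_ne, ne_eq]
            intro he
            exact hseen ((hinv2 (pvLast6 x)).mpr ⟨hcF, p, hp, he⟩)
          have h2 : pvKept S pre (x :: xs) = x :: pvKept S (pre ++ [x]) xs := by
            simp only [pvKept]; rw [if_pos (by rw [hcF, hall]; rfl)]
          rw [h1, h2]
          have ih' := ih (pre ++ [x]) (acc1 ++ [x]) (acc2 ++ [pvLast6 x]) ?_ ?_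
          · rw [ih']; simp
          · intro s
            constructor
            · intro hcon
              rcases List.contains_iff_mem.mp hcon |> List.mem_append.mp with h | h
              · obtain ⟨hns, q, hq, hqe⟩ := (hinv2 s).mp (List.contains_iff_mem.mpr h)
                exact ⟨hns, q, List.mem_append_left _ hq, hqe⟩
              · simp at h; subst h
                exact ⟨hcF, x, List.mem_append_right _ (by simp), rfl⟩
            · rintro ⟨hns, q, hq, hqe⟩
              rcases List.mem_append.mp hq with h | h
              · exact List.contains_iff_mem.mpr
                  (List.mem_append_left _ (List.contains_iff_mem.mp ((hinv2 s).mpr ⟨hns, q, h, hqe⟩)))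
              · simp at h; subst h; subst hqe
                exact List.contains_iff_mem.mpr (List.mem_append_right _ (by simp))
          · intro y hy
            rcases List.mem_append.mp hy with h | h
            · exact List.contains_iff_mem.mpr
                (List.mem_append_left _ (List.contains_iff_mem.mp (hinv1 y h)))
            · simp at h; subst h
              exact List.contains_iff_mem.mpr (List.mem_append_right _ (by simp))

-- ===== VERDICT (by name: the statement is the Claim_ definition above) =====
theorem get_lexis_cases_not_in_ciprs_spec : Claim_equal_get_lexis_cases_not_in_ciprs := by
  intro lexis ciprs _
  show get_lexis_cases_not_in_ciprs lexis ciprs = get_lexis_cases_not_in_ciprs_alt lexis ciprs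
  have hA : get_lexis_cases_not_in_ciprs lexis ciprs = (lexis.foldl (pvAStep ciprs) ([], [])).1 := rfl
  rw [hA, aloop_eq ciprs lexis [] [] [] (by simp) (by simp)]
  show pvKept (PySem.Set.ofList (ciprs.map pvLast6)) [] lexis
      = (pvBGo (PySem.Set.ofList (ciprs.map pvLast6)) lexis []).reverse
  rw [bgo_eq]
  simp
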